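-- pv_equiv track=rewrite | github.com/frizynn/tp2-acso | bomb3/phase2.py | valid_phase2_pairs
-- ===== SOURCE A (Python) =====
-- def valid_phase2_pairs(xmin=-100000, xmax=100000):
--     """
--     Retorna una lista de pares (X, Y) que cumplen con:
--       1) X + Y == 49433
--       2) X ≠ 0 y Y ≠ 0  (es decir, X·Y ≠ 0)
--       3) El resultado de (X XOR Y), interpretado en 32 bits,
--          es negativo (su bit de signo está en 1)
--
--     Se itera sobre X en el rango [xmin, xmax] y se calcula Y = 49433 - X.
--     """
--     resultados = []
--     target_sum = 49433  # 0xC119 en decimal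
--     for X in range(xmin, xmax + 1):
--         Y = target_sum - X
--         # Evitar que alguno sea 0 (pues su producto sería 0)
--         if X == 0 or Y == 0:
--             continue
--
--         # Simular el XOR de 32 bits: obtener el valor en 32 bits
--         xor_val = (X ^ Y) & 0xFFFFFFFF
--         # En un sistema de 32 bits, un número es negativo si >= 0x80000000.
--         if xor_val >= 0x80000000:
--             resultados.append((X, Y))
--     return resultados
-- ===== SOURCE B (Python) =====
-- def valid_phase2_pairs(xmin=-100000, xmax=100000):
--     """Same pairs as the XOR scan, built directly from the two X-ranges whose
--     32-bit sign bits of X and Y = 49433 - X differ."""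
--     TARGET = 49433
--     # X negative (sign bit 1) with Y = TARGET - X in [0, 2^31) (sign bit 0):
--     neg_lo = max(xmin, TARGET - 2**31 + 1)
--     neg_hi = min(xmax, -1)
--     # X in [0, 2^31) (sign bit 0) with Y negative (sign bit 1):
--     pos_lo = max(xmin, TARGET + 1)
--     pos_hi = min(xmax, 2**31 - 1)
--     res = [(x, TARGET - x) for x in range(neg_lo, neg_hi + 1)]
--     res.extend((x, TARGET - x) for x in range(pos_lo, pos_hi + 1))
--     return res
-- ===== Notes on version B (the rewrite author's own statement) =====
-- stated objective: simpler
-- what changed: Instead of scanning every X in [xmin, xmax] and testing the 32-bit sign bit of X^(49433-X), B computes the two X-intervals on which that sign test holds (negative X with Y below 2^31, and X in [49434, 2^31-1]) and emits the clipped ranges directly, with no per-element bit test.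
import Mathlib
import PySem

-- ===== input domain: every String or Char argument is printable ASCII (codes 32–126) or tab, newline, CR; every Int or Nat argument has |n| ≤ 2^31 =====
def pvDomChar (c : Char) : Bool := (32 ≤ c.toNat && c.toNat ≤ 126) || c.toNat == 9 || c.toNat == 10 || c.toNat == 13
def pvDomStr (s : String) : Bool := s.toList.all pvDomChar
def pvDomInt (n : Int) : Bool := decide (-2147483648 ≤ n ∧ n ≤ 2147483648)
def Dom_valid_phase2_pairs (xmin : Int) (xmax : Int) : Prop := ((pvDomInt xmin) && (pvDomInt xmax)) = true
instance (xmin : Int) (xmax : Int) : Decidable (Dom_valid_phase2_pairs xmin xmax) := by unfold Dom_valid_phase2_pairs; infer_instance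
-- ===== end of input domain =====

-- B replaces A's full scan with the XOR test by directly enumerating the two
-- clipped X-ranges on which the 32-bit sign bits of X and Y = 49433 - X differ
-- (objective: simpler — the per-element bit test disappears).

-- ===== PORT A =====
def valid_phase2_pairs (xmin : Int) (xmax : Int) : List (Int × Int) :=
  let target_sum : Int := 49433
  (PySem.List.pyRange xmin (xmax + 1) 1).foldl
    (fun resultados X =>
      let Y := target_sum - X
      if X = 0 ∨ Y = 0 then resultados
      else
        let xor_val := PySem.Int.band (PySem.Int.bxor X Y) 0xFFFFFFFF
        if (0x80000000 : Int) ≤ xor_val then resultados ++ [(X, Y)]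
        else resultados)
    []

-- ===== PORT B =====
def valid_phase2_pairs_alt (xmin : Int) (xmax : Int) : List (Int × Int) :=
  let target : Int := 49433
  let negLo := max xmin (target - 2 ^ 31 + 1)
  let negHi := min xmax (-1)
  let posLo := max xmin (target + 1)
  let posHi := min xmax (2 ^ 31 - 1)
  ((PySem.List.pyRange negLo (negHi + 1) 1).map (fun x => (x, target - x))) ++
  ((PySem.List.pyRange posLo (posHi + 1) 1).map (fun x => (x, target - x)))

-- ===== PRECONDITION & SPEC =====
def Spec_valid_phase2_pairs (xmin : Int) (xmax : Int) (out : List (Int × Int)) : Prop := out = valid_phase2_pairs_alt xmin xmax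
instance (xmin : Int) (xmax : Int) (out : List (Int × Int)) : Decidable (Spec_valid_phase2_pairs xmin xmax out) := by unfold Spec_valid_phase2_pairs; infer_instance

-- ===== CLAIM (what is proved, stated in full; the proofs are below) =====
def Claim_equal_valid_phase2_pairs : Prop := ∀ (xmin : Int) (xmax : Int), Dom_valid_phase2_pairs xmin xmax → Spec_valid_phase2_pairs xmin xmax (valid_phase2_pairs xmin xmax)

-- ===== LEMMAS AND PROOFS =====

-- The loop body's combined test, as a Boolean predicate on X.
def pvTest (X : Int) : Bool :=
  !decide (X = 0 ∨ 49433 - X = 0) &&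
  decide ((2147483648 : Int) ≤ PySem.Int.band (PySem.Int.bxor X (49433 - X)) 4294967295)

-- bit 31 of the xor is set (for 2^31 ≤ k < 2^32, m < 2^31)
lemma pv_xor_high (m k : Nat) (h : m < 2 ^ 31) (h2 : 2 ^ 31 ≤ k) (h3 : k < 2 ^ 32) :
    2 ^ 31 ≤ m ^^^ k := by
  have hd : (m ^^^ k) >>> 31 = m >>> 31 ^^^ k >>> 31 := Nat.shiftRight_xor_distrib ..
  rw [Nat.shiftRight_eq_div_pow, Nat.shiftRight_eq_div_pow, Nat.shiftRight_eq_div_pow] at hd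
  have hm : m / 2 ^ 31 = 0 := Nat.div_eq_of_lt h
  have hk : k / 2 ^ 31 = 1 := by omega
  rw [hm, hk] at hd
  simp at hd
  have := Nat.div_mul_le_self (m ^^^ k) (2 ^ 31)
  omega

lemma pv_mask (n : Nat) : n &&& 4294967295 = n % 4294967296 := by
  have := Nat.and_two_pow_sub_one_eq_mod n 32
  norm_num at this
  omega

-- band of a negative xor with the 32-bit mask, in closed form
lemma pv_band_neg (n : Nat) :
    PySem.Int.band (-(n : Int) - 1) 4294967295 = ((4294967295 - n % 4294967296 : Nat) : Int) := by
  simp only [PySem.Int.band]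
  rw [if_neg (by omega), if_pos (by omega)]
  have h1 : ((4294967295 : Int)).toNat = 4294967295 := by omega
  have h2 : (-(-(n : Int) - 1) - 1).toNat = n := by omega
  rw [h1, h2, Nat.and_comm, pv_mask]

-- band of a nonnegative xor with the 32-bit mask
lemma pv_band_nonneg (n : Nat) :
    PySem.Int.band ((n : Int)) 4294967295 = ((n &&& 4294967295 : Nat) : Int) := by
  simp only [PySem.Int.band]
  rw [if_pos (by omega), if_pos (by omega)]
  have h1 : ((n : Int)).toNat = n := by omega
  have h2 : ((4294967295 : Int)).toNat = 4294967295 := by omega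
  rw [h1, h2]

-- Characterisation of A's test on the 32-bit domain.
lemma pvTest_iff (X : Int) (hlo : -2147483648 ≤ X) (hhi : X ≤ 2147483648) :
    pvTest X = true ↔
      ((49433 - 2 ^ 31 + 1 ≤ X ∧ X ≤ -1) ∨ (49434 ≤ X ∧ X ≤ 2 ^ 31 - 1)) := by
  unfold pvTest
  simp only [Bool.and_eq_true, Bool.not_eq_true', decide_eq_false_iff_not, decide_eq_true_eq]
  rcases lt_trichotomy X 0 with hX | hX | hX
  · -- X < 0, so Y = 49433 - X > 0
    have hbx : PySem.Int.bxor X (49433 - X) =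
        -(((-X - 1).toNat ^^^ (49433 - X).toNat : Nat) : Int) - 1 := by
      simp only [PySem.Int.bxor]
      rw [if_neg (by omega), if_pos (by omega)]
    rw [hbx, pv_band_neg]
    set m : Nat := (-X - 1).toNat with hm
    set k : Nat := (49433 - X).toNat with hk
    have hmlt : m < 2 ^ 31 := by omega
    by_cases hkc : k < 2 ^ 31
    · have hx31 : m ^^^ k < 2 ^ 31 := Nat.xor_lt_two_pow hmlt hkc
      have : (m ^^^ k) % 4294967296 = m ^^^ k := Nat.mod_eq_of_lt (by omega)
      rw [this]
      omega
    · have hk32 : k < 2 ^ 32 := by omega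
      have hge : 2 ^ 31 ≤ m ^^^ k := pv_xor_high m k hmlt (by omega) hk32
      have hlt : m ^^^ k < 2 ^ 32 := Nat.xor_lt_two_pow (by omega) hk32
      have : (m ^^^ k) % 4294967296 = m ^^^ k := Nat.mod_eq_of_lt (by omega)
      rw [this]
      omega
  · -- X = 0: the guard rules it out
    subst hX
    norm_num
  · -- X > 0
    by_cases hY : X ≤ 49433
    · -- Y = 49433 - X ≥ 0: both operands small and nonnegative
      have hbx : PySem.Int.bxor X (49433 - X) =
          ((X.toNat ^^^ (49433 - X).toNat : Nat) : Int) := by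
        simp only [PySem.Int.bxor]
        rw [if_pos (by omega), if_pos (by omega)]
      rw [hbx, pv_band_nonneg]
      have hx16 : X.toNat ^^^ (49433 - X).toNat < 2 ^ 16 :=
        Nat.xor_lt_two_pow (by omega) (by omega)
      have := Nat.and_le_left (n := X.toNat ^^^ (49433 - X).toNat) (m := 4294967295)
      omega
    · -- X > 49433, so Y < 0
      have hbx : PySem.Int.bxor X (49433 - X) =
          -((X.toNat ^^^ (-(49433 - X) - 1).toNat : Nat) : Int) - 1 := by
        simp only [PySem.Int.bxor]
        rw [if_pos (by omega), if_neg (by omega)]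
      rw [hbx, pv_band_neg]
      set m : Nat := X.toNat with hm
      set k : Nat := (-(49433 - X) - 1).toNat with hk
      have hklt : k < 2 ^ 31 := by omega
      by_cases hmc : m < 2 ^ 31
      · have hx31 : m ^^^ k < 2 ^ 31 := Nat.xor_lt_two_pow hmc hklt
        have : (m ^^^ k) % 4294967296 = m ^^^ k := Nat.mod_eq_of_lt (by omega)
        rw [this]
        omega
      · have hm32 : m < 2 ^ 32 := by omega
        have hge : 2 ^ 31 ≤ k ^^^ m := pv_xor_high k m hklt (by omega) hm32
        have hlt : m ^^^ k < 2 ^ 32 := Nat.xor_lt_two_pow hm32 (by omega)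
        rw [Nat.xor_comm] at hge
        have : (m ^^^ k) % 4294967296 = m ^^^ k := Nat.mod_eq_of_lt (by omega)
        rw [this]
        omega

lemma pv_filter_eq (xmin xmax : Int)
    (h1 : -2147483648 ≤ xmin) (h2 : xmin ≤ 2147483648)
    (h3 : -2147483648 ≤ xmax) (h4 : xmax ≤ 2147483648) :
    (PySem.List.pyRange xmin (xmax + 1) 1).filter pvTest =
      PySem.List.pyRange (max xmin (49433 - 2 ^ 31 + 1)) (min xmax (-1) + 1) 1 ++
      PySem.List.pyRange (max xmin (49433 + 1)) (min xmax (2 ^ 31 - 1) + 1) 1 := by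
  have sL : ((PySem.List.pyRange xmin (xmax + 1) 1).filter pvTest).Pairwise (· < ·) :=
    List.Pairwise.sublist List.filter_sublist (PySem.List.pairwise_lt_pyRange_one _ _)
  have sR : (PySem.List.pyRange (max xmin (49433 - 2 ^ 31 + 1)) (min xmax (-1) + 1) 1 ++
      PySem.List.pyRange (max xmin (49433 + 1)) (min xmax (2 ^ 31 - 1) + 1) 1).Pairwise (· < ·) := by
    rw [List.pairwise_append]
    refine ⟨PySem.List.pairwise_lt_pyRange_one _ _, PySem.List.pairwise_lt_pyRange_one _ _, ?_⟩
    intro x hx y hy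
    rw [PySem.List.mem_pyRange_one] at hx hy
    omega
  have hmem : ∀ x : Int, x ∈ (PySem.List.pyRange xmin (xmax + 1) 1).filter pvTest ↔
      x ∈ PySem.List.pyRange (max xmin (49433 - 2 ^ 31 + 1)) (min xmax (-1) + 1) 1 ++
        PySem.List.pyRange (max xmin (49433 + 1)) (min xmax (2 ^ 31 - 1) + 1) 1 := by
    intro x
    rw [List.mem_filter, List.mem_append, PySem.List.mem_pyRange_one,
      PySem.List.mem_pyRange_one, PySem.List.mem_pyRange_one]
    constructor
    · rintro ⟨hr, ht⟩
      rw [pvTest_iff x (by omega) (by omega)] at ht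
      omega
    · intro h
      refine ⟨by omega, ?_⟩
      rw [pvTest_iff x (by omega) (by omega)]
      omega
  have nL := sL.nodup
  have nR := sR.nodup
  exact List.Perm.eq_of_pairwise (fun a b _ _ hab hba => absurd hba (not_lt.mpr hab.le))
    sL sR ((List.perm_ext_iff_of_nodup nL nR).mpr hmem)

-- ===== VERDICT (by name: the statement is the Claim_ definition above) =====
theorem valid_phase2_pairs_spec : Claim_equal_valid_phase2_pairs := by
  intro xmin xmax hdom
  unfold Spec_valid_phase2_pairs valid_phase2_pairs valid_phase2_pairs_alt
  simp only [Dom_valid_phase2_pairs, pvDomInt, Bool.and_eq_true, decide_eq_true_eq] at hdom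
  obtain ⟨⟨h1, h2⟩, h3, h4⟩ := hdom
  have hfun : (fun (resultados : List (Int × Int)) (X : Int) =>
      let Y := (49433 : Int) - X
      if X = 0 ∨ Y = 0 then resultados
      else
        let xor_val := PySem.Int.band (PySem.Int.bxor X Y) 0xFFFFFFFF
        if (0x80000000 : Int) ≤ xor_val then resultados ++ [(X, Y)]
        else resultados) =
      (fun acc x => if pvTest x = true then acc ++ [(x, 49433 - x)] else acc) := by
    funext acc x
    simp only [pvTest, Bool.and_eq_true, Bool.not_eq_true', decide_eq_false_iff_not,
      decide_eq_true_eq]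
    split_ifs with hz ht hne <;> simp_all
  simp only []
  rw [hfun, PySem.List.foldl_append_if pvTest (fun x => (x, 49433 - x))]
  rw [List.nil_append, pv_filter_eq xmin xmax h1 h2 h3 h4, List.map_append]
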